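-- pv_equiv track=rewrite | github.com/olgaObnosova/EGE | №25/335_Поляков.py | f
-- ===== SOURCE A (Python) =====
-- def f(n):
--   s = set()
--   for i in range(2, int(n)):
--     if n % i == 0 and i % 10 == 9 and i != 9:
--       s.add(i)
--       if (n // i) % 10 == 9 and (n // i) != 9:
--         s.add(n // i)
--   return s
-- ===== SOURCE B (Python) =====
-- def f(n):
--     # Enumerate divisors by trial division up to sqrt(n), then filter the
--     # qualifying ones in ascending order (O(sqrt n) instead of A's O(n) scan).
--     divs = set()
--     i = 1
--     while i * i <= n:
--         if n % i == 0:
--             divs.add(i)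
--             divs.add(n // i)
--         i += 1
--     s = set()
--     for d in sorted(divs):
--         if d % 10 == 9 and d != 9 and d < n:
--             s.add(d)
--             c = n // d
--             if c % 10 == 9 and c != 9:
--                 s.add(c)
--     return s
-- ===== Notes on version B (the rewrite author's own statement) =====
-- stated objective: faster
-- what changed: replaces A's scan of every i in range(2,n) by trial division up to sqrt(n) that enumerates the divisors, then filters the sorted divisors
import Mathlib
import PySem

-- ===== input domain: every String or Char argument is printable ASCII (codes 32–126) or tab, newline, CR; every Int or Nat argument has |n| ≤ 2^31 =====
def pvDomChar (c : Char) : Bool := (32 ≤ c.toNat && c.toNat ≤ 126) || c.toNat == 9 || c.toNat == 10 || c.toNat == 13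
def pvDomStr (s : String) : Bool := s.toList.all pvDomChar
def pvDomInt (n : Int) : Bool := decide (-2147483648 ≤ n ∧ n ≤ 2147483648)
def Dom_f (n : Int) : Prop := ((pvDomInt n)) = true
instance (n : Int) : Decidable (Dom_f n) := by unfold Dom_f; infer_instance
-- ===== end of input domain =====

-- B replaces A's O(n) scan of range(2, n) by trial division up to sqrt(n); return value proved equal.

-- ===== PORT A =====
def f (n : Int) : List Int :=
  (PySem.List.pyRange 2 n 1).foldl (fun s i =>
    if PySem.Int.mod n i = 0 ∧ PySem.Int.mod i 10 = 9 ∧ i ≠ 9 then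
      if PySem.Int.mod (PySem.Int.floordiv n i) 10 = 9 ∧ PySem.Int.floordiv n i ≠ 9 then
        PySem.Set.add (PySem.Set.add s i) (PySem.Int.floordiv n i)
      else PySem.Set.add s i
    else s) []

-- ===== PORT B =====
-- the 'while i*i <= n' divisor-collecting loop of Source B; 'fuel' only totalizes the
-- while loop (any fuel with n + 1 ≤ i + fuel gives the loop's exact result)
def fAltCollect (n : Int) (fuel : Nat) (i : Int) (s : List Int) : List Int :=
  match fuel with
  | 0 => s
  | fuel + 1 =>
    if i * i ≤ n then
      fAltCollect n fuel (i + 1)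
        (if PySem.Int.mod n i = 0 then
          PySem.Set.add (PySem.Set.add s i) (PySem.Int.floordiv n i)
        else s)
    else s

def f_alt (n : Int) : List Int :=
  (PySem.List.sorted (fAltCollect n (n + 1).toNat 1 []) (fun x => x) false).foldl (fun s d =>
    if PySem.Int.mod d 10 = 9 ∧ d ≠ 9 ∧ d < n then
      if PySem.Int.mod (PySem.Int.floordiv n d) 10 = 9 ∧ PySem.Int.floordiv n d ≠ 9 then
        PySem.Set.add (PySem.Set.add s d) (PySem.Int.floordiv n d)
      else PySem.Set.add s d
    else s) []

-- ===== PRECONDITION & SPEC =====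
def Spec_f (n : Int) (out : List Int) : Prop := out = f_alt n
instance (n : Int) (out : List Int) : Decidable (Spec_f n out) := by unfold Spec_f; infer_instance

-- ===== CLAIM (what is proved, stated in full; the proofs are below) =====
def Claim_equal_f : Prop := ∀ (n : Int), Dom_f n → Spec_f n (f n)

-- ===== LEMMAS AND PROOFS =====

-- two strictly increasing integer lists with the same members are equal
lemma eq_of_pairwise_lt_of_mem_iff :
    ∀ (l₁ l₂ : List Int), l₁.Pairwise (· < ·) → l₂.Pairwise (· < ·) →
      (∀ x, x ∈ l₁ ↔ x ∈ l₂) → l₁ = l₂ := by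
  intro l₁
  induction l₁ with
  | nil =>
    intro l₂ _ _ hm
    cases l₂ with
    | nil => rfl
    | cons b t => exact absurd ((hm b).2 (by simp)) (by simp)
  | cons a t ih =>
    intro l₂ h₁ h₂ hm
    cases l₂ with
    | nil => exact absurd ((hm a).1 (by simp)) (by simp)
    | cons b t₂ =>
      have hab : a = b := by
        have ha : a = b ∨ a ∈ t₂ := by simpa using (hm a).1 (by simp)
        have hb : b = a ∨ b ∈ t := by simpa using (hm b).2 (by simp)
        rcases ha with h | ha
        · exact h
        · rcases hb with h | hb
          · exact h.symm
          · have h1 : b < a := List.rel_of_pairwise_cons h₂ ha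
            have h2 : a < b := List.rel_of_pairwise_cons h₁ hb
            omega
      subst hab
      have ht : t = t₂ := by
        apply ih t₂ h₁.of_cons h₂.of_cons
        intro x
        constructor
        · intro hx
          have hgt : a < x := List.rel_of_pairwise_cons h₁ hx
          have : x = a ∨ x ∈ t₂ := by simpa using (hm x).1 (by simp [hx])
          rcases this with h | h
          · omega
          · exact h
        · intro hx
          have hgt : a < x := List.rel_of_pairwise_cons h₂ hx
          have : x = a ∨ x ∈ t := by simpa using (hm x).2 (by simp [hx])
          rcases this with h | h
          · omega
          · exact h
      rw [ht]

lemma nodup_fAltCollect (n : Int) :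
    ∀ (fuel : Nat) (i : Int) (s : List Int), s.Nodup → (fAltCollect n fuel i s).Nodup := by
  intro fuel
  induction fuel with
  | zero => intro i s hs; exact hs
  | succ fuel ih =>
    intro i s hs
    rw [fAltCollect]
    split
    · apply ih
      split
      · exact PySem.Set.nodup_add _ _ (PySem.Set.nodup_add _ _ hs)
      · exact hs
    · exact hs

lemma mem_fAltCollect (n x : Int) :
    ∀ (fuel : Nat) (i : Int) (s : List Int), 1 ≤ i → n + 1 ≤ i + (fuel : Int) →
      (x ∈ fAltCollect n fuel i s ↔
        x ∈ s ∨ ∃ j : Int, i ≤ j ∧ j * j ≤ n ∧ PySem.Int.mod n j = 0 ∧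
          (x = j ∨ x = PySem.Int.floordiv n j)) := by
  intro fuel
  induction fuel with
  | zero =>
    intro i s hi hf
    constructor
    · exact Or.inl
    · rintro (hx | ⟨j, hj1, hj2, _, _⟩)
      · exact hx
      · exfalso
        have hjj : j ≤ j * j := le_mul_of_one_le_left (by omega) (by omega)
        omega
  | succ fuel ih =>
    intro i s hi hf
    rw [fAltCollect]
    by_cases h : i * i ≤ n
    · rw [if_pos h, ih (i + 1) _ (by omega) (by omega)]
      constructor
      · rintro (hx | ⟨j, hj1, hj2, hj3, hj4⟩)
        · by_cases hd : PySem.Int.mod n i = 0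
          · rw [if_pos hd] at hx
            rcases (PySem.Set.mem_add _ _ _).1 hx with hx | hx
            · rcases (PySem.Set.mem_add _ _ _).1 hx with hx | hx
              · exact Or.inl hx
              · exact Or.inr ⟨i, le_refl i, h, hd, Or.inl hx⟩
            · exact Or.inr ⟨i, le_refl i, h, hd, Or.inr hx⟩
          · rw [if_neg hd] at hx
            exact Or.inl hx
        · exact Or.inr ⟨j, by omega, hj2, hj3, hj4⟩
      · rintro (hx | ⟨j, hj1, hj2, hj3, hj4⟩)
        · left
          split
          · exact (PySem.Set.mem_add _ _ _).2 (Or.inl ((PySem.Set.mem_add _ _ _).2 (Or.inl hx)))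
          · exact hx
        · by_cases hji : j = i
          · subst hji
            left
            rw [if_pos hj3]
            rcases hj4 with h4 | h4
            · exact (PySem.Set.mem_add _ _ _).2 (Or.inl ((PySem.Set.mem_add _ _ _).2 (Or.inr h4)))
            · exact (PySem.Set.mem_add _ _ _).2 (Or.inr h4)
          · exact Or.inr ⟨j, by omega, hj2, hj3, hj4⟩
    · rw [if_neg h]
      constructor
      · exact Or.inl
      · rintro (hx | ⟨j, hj1, hj2, hj3, _⟩)
        · exact hx
        · exfalso
          have : i * i ≤ j * j := by nlinarith
          omega

-- for n ≥ 1 the collected set is exactly the positive divisors of n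
lemma mem_fAltCollect_iff_dvd (n : Int) (hn : 1 ≤ n) (x : Int) :
    x ∈ fAltCollect n (n + 1).toNat 1 [] ↔ 1 ≤ x ∧ x ∣ n := by
  rw [mem_fAltCollect n x (n + 1).toNat 1 [] (le_refl 1) (by omega)]
  simp only [List.not_mem_nil, false_or]
  constructor
  · rintro ⟨j, hj1, hj2, hj3, hj4⟩
    have hjd : j ∣ n := (PySem.Int.mod_eq_zero_iff_dvd n j).1 hj3
    obtain ⟨c, hc⟩ := hjd
    have hc1 : 1 ≤ c := by nlinarith
    have hfd : PySem.Int.floordiv n j = c := by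
      rw [PySem.Int.floordiv_eq_ediv_of_pos (by omega), hc,
        Int.mul_ediv_cancel_left c (by omega)]
    rcases hj4 with h4 | h4
    · exact ⟨by omega, by rw [h4]; exact ⟨c, hc⟩⟩
    · refine ⟨by omega, ?_⟩
      rw [h4, hfd]
      exact ⟨j, by linarith [hc, mul_comm j c]⟩
  · rintro ⟨hx1, c, hc⟩
    have hc1 : 1 ≤ c := by nlinarith
    by_cases hxx : x * x ≤ n
    · exact ⟨x, hx1, hxx, (PySem.Int.mod_eq_zero_iff_dvd n x).2 ⟨c, hc⟩, Or.inl rfl⟩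
    · refine ⟨c, hc1, by nlinarith, (PySem.Int.mod_eq_zero_iff_dvd n c).2 ⟨x, by linarith [hc, mul_comm x c]⟩, Or.inr ?_⟩
      rw [PySem.Int.floordiv_eq_ediv_of_pos (by omega), hc, mul_comm x c,
        Int.mul_ediv_cancel_left x (by omega)]

-- the two filtered candidate lists coincide
lemma filter_lists_eq (n : Int) :
    ((PySem.List.pyRange 2 n 1).filter
      (fun i => decide (PySem.Int.mod n i = 0 ∧ PySem.Int.mod i 10 = 9 ∧ i ≠ 9))) =
    ((PySem.List.sorted (fAltCollect n (n + 1).toNat 1 []) (fun x => x) false).filter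
      (fun d => decide (PySem.Int.mod d 10 = 9 ∧ d ≠ 9 ∧ d < n))) := by
  by_cases hn : 1 ≤ n
  · apply eq_of_pairwise_lt_of_mem_iff
    · exact (PySem.List.pairwise_lt_pyRange_one 2 n).filter _
    · have hnd : (fAltCollect n (n + 1).toNat 1 []).Nodup := nodup_fAltCollect n (n + 1).toNat 1 [] List.nodup_nil
      have hsile : (PySem.List.sorted (fAltCollect n (n + 1).toNat 1 []) (fun x => x) false).Pairwise
          (fun a b => (fun x => x) a ≤ (fun x => x) b) := PySem.List.sorted_pairwise _ _
      have hsnd : (PySem.List.sorted (fAltCollect n (n + 1).toNat 1 []) (fun x => x) false).Nodup :=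
        (PySem.List.sorted_perm (fAltCollect n (n + 1).toNat 1 []) (fun x => x) false).nodup_iff.2 hnd
      have : (PySem.List.sorted (fAltCollect n (n + 1).toNat 1 []) (fun x => x) false).Pairwise (· < ·) := by
        refine (hsile.and hsnd).imp ?_
        rintro a b ⟨h1, h2⟩
        exact lt_of_le_of_ne h1 h2
      exact this.filter _
    · intro x
      simp only [List.mem_filter, PySem.List.mem_pyRange_one, PySem.List.mem_sorted,
        decide_eq_true_eq, mem_fAltCollect_iff_dvd n hn x]
      have hmod : PySem.Int.mod x 10 = x % 10 := PySem.Int.mod_eq_emod_of_pos (by omega)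
      constructor
      · rintro ⟨⟨hx2, hxn⟩, hd, h9, hne⟩
        exact ⟨⟨by omega, (PySem.Int.mod_eq_zero_iff_dvd n x).1 hd⟩, h9, hne, hxn⟩
      · rintro ⟨⟨hx1, hdvd⟩, h9, hne, hxn⟩
        refine ⟨⟨?_, hxn⟩, (PySem.Int.mod_eq_zero_iff_dvd n x).2 hdvd, h9, hne⟩
        rw [hmod] at h9
        omega
  · have h1 : PySem.List.pyRange 2 n 1 = [] := PySem.List.pyRange_one_eq_nil (by omega)
    have h2 : fAltCollect n (n + 1).toNat 1 [] = [] := by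
      have : (n + 1).toNat = 0 ∨ ¬ ((1:Int) * 1 ≤ n) := by omega
      rcases this with h | h
      · rw [h]; rfl
      · cases hk : (n + 1).toNat with
        | zero => rfl
        | succ k => rw [fAltCollect, if_neg h]
    rw [h1, h2]
    rfl

-- ===== VERDICT (by name: the statement is the Claim_ definition above) =====
theorem f_spec : Claim_equal_f := by
  intro n _
  unfold Spec_f f f_alt
  rw [PySem.List.foldl_ite_eq_foldl_filter, PySem.List.foldl_ite_eq_foldl_filter,
    filter_lists_eq n]
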